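-- pv_equiv track=rewrite | github.com/minakhan01/ComputerUsageRL | redact_data.py | _get_bucket_key_dict
-- ===== SOURCE A (Python) =====
-- def _get_bucket_key_dict(bucket_keys):
--     bucket_key_dict = {
--     'afk': None,
--     'desktop': None,
--     'browser': None,
--     'stopwatch': None
--     }
--
--     for key in bucket_keys:
--
--         if 'aw-watcher-afk' in key:
--             bucket_key_dict['afk'] = key
--
--         if 'aw-watcher-window' in key:
--             bucket_key_dict['desktop'] = key
--
--         if 'aw-watcher-web' in key:
--             bucket_key_dict['browser'] = key
--
--         if 'aw-stopwatch' in key: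
--             bucket_key_dict['stopwatch'] = key
--
--     return bucket_key_dict
-- ===== SOURCE B (Python) =====
-- def _get_bucket_key_dict(bucket_keys):
--     # Transposed decomposition: one scan per category, picking the LAST matching key.
--     keys = list(bucket_keys)
--     table = [
--         ('afk', 'aw-watcher-afk'),
--         ('desktop', 'aw-watcher-window'),
--         ('browser', 'aw-watcher-web'),
--         ('stopwatch', 'aw-stopwatch'),
--     ]
--     return {cat: next((k for k in reversed(keys) if sub in k), None)
--             for cat, sub in table}
-- ===== Notes on version B (the rewrite author's own statement) =====
-- stated objective: alternative
-- what changed: Instead of A's single pass that mutates a four-entry dict per key, B iterates over a (category, substring) table and for each category scans the key list in reverse to pick the last key containing the substring.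
import Mathlib
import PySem

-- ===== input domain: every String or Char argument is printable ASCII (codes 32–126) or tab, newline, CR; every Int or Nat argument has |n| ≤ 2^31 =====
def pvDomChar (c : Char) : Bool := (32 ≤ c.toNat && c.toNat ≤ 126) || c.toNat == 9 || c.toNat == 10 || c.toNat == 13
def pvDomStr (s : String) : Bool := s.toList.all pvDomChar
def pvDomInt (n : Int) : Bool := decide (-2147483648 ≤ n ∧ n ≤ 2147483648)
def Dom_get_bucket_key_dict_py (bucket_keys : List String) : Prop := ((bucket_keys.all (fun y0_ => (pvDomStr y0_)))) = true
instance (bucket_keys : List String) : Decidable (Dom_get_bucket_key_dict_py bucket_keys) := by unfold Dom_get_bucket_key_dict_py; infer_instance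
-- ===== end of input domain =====

-- B replaces A's single mutating pass over a four-entry dict by one reverse scan per category (alternative decomposition, same cost).


-- ===== PORT A =====
-- loop body of A: four independent 'if substring in key' updates of the dict
def pvStepA (d : PySem.Dict String (Option String)) (key : String) : PySem.Dict String (Option String) :=
  let d := if PySem.Str.isIn "aw-watcher-afk" key then d.insert "afk" (some key) else d
  let d := if PySem.Str.isIn "aw-watcher-window" key then d.insert "desktop" (some key) else d
  let d := if PySem.Str.isIn "aw-watcher-web" key then d.insert "browser" (some key) else d
  let d := if PySem.Str.isIn "aw-stopwatch" key then d.insert "stopwatch" (some key) else d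
  d

def get_bucket_key_dict_py (bucket_keys : List String) : List (String × Option String) :=
  let init : PySem.Dict String (Option String) :=
    PySem.Dict.ofList [("afk", none), ("desktop", none), ("browser", none), ("stopwatch", none)]
  (bucket_keys.foldl pvStepA init).items

-- ===== PORT B =====
def get_bucket_key_dict_py_alt (bucket_keys : List String) : List (String × Option String) :=
  let keys := bucket_keys
  let table : List (String × String) :=
    [("afk", "aw-watcher-afk"), ("desktop", "aw-watcher-window"),
     ("browser", "aw-watcher-web"), ("stopwatch", "aw-stopwatch")]
  table.map (fun p => (p.1, keys.reverse.find? (fun k => PySem.Str.isIn p.2 k)))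

-- ===== PRECONDITION & SPEC =====
def Spec_get_bucket_key_dict_py (bucket_keys : List String) (out : List (String × Option String)) : Prop := out = get_bucket_key_dict_py_alt bucket_keys
instance (bucket_keys : List String) (out : List (String × Option String)) : Decidable (Spec_get_bucket_key_dict_py bucket_keys out) := by unfold Spec_get_bucket_key_dict_py; infer_instance

-- ===== CLAIM (what is proved, stated in full; the proofs are below) =====
def Claim_equal_get_bucket_key_dict_py : Prop := ∀ (bucket_keys : List String), Dom_get_bucket_key_dict_py bucket_keys → Spec_get_bucket_key_dict_py bucket_keys (get_bucket_key_dict_py bucket_keys)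

-- ===== LEMMAS AND PROOFS =====

-- "last matching element" as A's fold computes it, per category
def pvLast (sub : String) (a : Option String) (keys : List String) : Option String :=
  keys.foldl (fun acc k => if PySem.Str.isIn sub k then some k else acc) a

lemma pvLast_eq_find_reverse (sub : String) : ∀ (keys : List String) (a : Option String),
    pvLast sub a keys =
      match keys.reverse.find? (fun k => PySem.Str.isIn sub k) with
      | some m => some m
      | none => a := by
  intro keys
  induction keys with
  | nil => intro a; simp [pvLast]
  | cons k ks ih =>
    intro a
    have : pvLast sub a (k :: ks) = pvLast sub (if PySem.Str.isIn sub k then some k else a) ks := rfl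
    rw [this, ih]
    simp only [List.reverse_cons, List.find?_append]
    cases h : ks.reverse.find? (fun k => PySem.Str.isIn sub k) <;>
      simp only [List.find?_cons, List.find?_nil] <;>
      by_cases hk : PySem.Chars.isIn sub.toList k.toList = true <;> simp [PySem.Str.isIn, hk]

lemma pvStepA_mk (a d b s : Option String) (key : String) :
    pvStepA (PySem.Dict.mk [("afk", a), ("desktop", d), ("browser", b), ("stopwatch", s)]) key =
    PySem.Dict.mk [("afk", if PySem.Str.isIn "aw-watcher-afk" key then some key else a),
                   ("desktop", if PySem.Str.isIn "aw-watcher-window" key then some key else d),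
                   ("browser", if PySem.Str.isIn "aw-watcher-web" key then some key else b),
                   ("stopwatch", if PySem.Str.isIn "aw-stopwatch" key then some key else s)] := by
  unfold pvStepA
  split_ifs <;> rfl

lemma loopA_eq (keys : List String) : ∀ (a d b s : Option String),
    keys.foldl pvStepA (PySem.Dict.mk [("afk", a), ("desktop", d), ("browser", b), ("stopwatch", s)]) =
    PySem.Dict.mk [("afk", pvLast "aw-watcher-afk" a keys),
                   ("desktop", pvLast "aw-watcher-window" d keys),
                   ("browser", pvLast "aw-watcher-web" b keys),
                   ("stopwatch", pvLast "aw-stopwatch" s keys)] := by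
  induction keys with
  | nil => intro a d b s; rfl
  | cons k ks ih =>
    intro a d b s
    rw [List.foldl_cons, pvStepA_mk, ih]
    rfl

-- ===== VERDICT (by name: the statement is the Claim_ definition above) =====
theorem get_bucket_key_dict_py_spec : Claim_equal_get_bucket_key_dict_py := by
  intro bucket_keys _
  unfold Spec_get_bucket_key_dict_py get_bucket_key_dict_py get_bucket_key_dict_py_alt
  have hinit : (PySem.Dict.ofList [("afk", (none : Option String)), ("desktop", none), ("browser", none), ("stopwatch", none)]) =
      PySem.Dict.mk [("afk", none), ("desktop", none), ("browser", none), ("stopwatch", none)] := by rfl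
  simp only [hinit, loopA_eq, pvLast_eq_find_reverse, List.map]
  cases h1 : bucket_keys.reverse.find? (fun k => PySem.Str.isIn "aw-watcher-afk" k) <;>
  cases h2 : bucket_keys.reverse.find? (fun k => PySem.Str.isIn "aw-watcher-window" k) <;>
  cases h3 : bucket_keys.reverse.find? (fun k => PySem.Str.isIn "aw-watcher-web" k) <;>
  cases h4 : bucket_keys.reverse.find? (fun k => PySem.Str.isIn "aw-stopwatch" k) <;>
  rfl
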